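-- pv_equiv track=rewrite | github.com/ajjoona-git/Algorithm-Study | week-3/20739/20739.py | get_longest
-- ===== SOURCE A (Python) =====
-- def get_longest(arr, n, m):
--     """주어진 nxm 크기의 배열(arr)에서 가로 방향으로 가장 긴 구조물의 길이를 반환하는 함수"""
--     max_count = 0
--
--     for r in range(n):
--         c = 0  # 초기 위치
--
--         while c < m:
--             count = 0
--             # 범위 내에서 구조물('1')을 발견하면 길이를 구한다.
--             while c + count < m and arr[r][c + count] == '1':
--                 count += 1
--             # 최대 길이 갱신
--             if max_count < count:
--                 max_count = count
--             # 다음 위치로 이동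
--             c += (count + 1)
--
--     return max_count
-- ===== SOURCE B (Python) =====
-- def get_longest(arr, n, m):
--     """Longest horizontal run of '1' cells, via one running-counter pass per row."""
--     best = 0
--     for row in arr[:max(0, n)]:
--         cur = 0
--         for cell in row[:max(0, m)]:
--             cur = cur + 1 if cell == '1' else 0
--             if cur > best:
--                 best = cur
--     return best
-- ===== Notes on version B (the rewrite author's own statement) =====
-- stated objective: simpler
-- what changed: Replaced A's skip-ahead double-while index scan (inner while measuring each run, outer while jumping past it) with a single running-counter/maximum fold over each row's sliced cells; B never indexes and so never raises.
import Mathlib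
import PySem

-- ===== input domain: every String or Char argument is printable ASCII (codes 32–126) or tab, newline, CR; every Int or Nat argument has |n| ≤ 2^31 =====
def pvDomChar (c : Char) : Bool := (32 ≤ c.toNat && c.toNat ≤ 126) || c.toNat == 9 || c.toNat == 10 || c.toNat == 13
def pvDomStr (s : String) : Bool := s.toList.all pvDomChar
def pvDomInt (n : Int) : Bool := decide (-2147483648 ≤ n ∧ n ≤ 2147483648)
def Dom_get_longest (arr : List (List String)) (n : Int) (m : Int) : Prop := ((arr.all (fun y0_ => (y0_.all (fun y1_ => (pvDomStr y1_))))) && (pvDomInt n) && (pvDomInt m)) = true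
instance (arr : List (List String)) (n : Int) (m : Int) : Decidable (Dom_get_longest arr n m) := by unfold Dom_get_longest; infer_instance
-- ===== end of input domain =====

-- B replaces A's skip-ahead double-while index scan with one running-counter fold per row (objective: simpler).

-- ===== PORT A =====
-- inner while: 'while c + count < m and arr[r][c + count] == '1': count += 1' (fuel-bounded; fuel only makes it total)
def aRun (row : List String) (m c count : Int) : Nat → Int
  | 0 => count
  | fuel+1 =>
    if c + count < m ∧ PySem.List.pyGet? row (c + count) = some "1" then
      aRun row m c (count + 1) fuel
    else count

-- outer while: 'while c < m: …' (fuel-bounded; fuel only makes it total)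
def aScan (row : List String) (m c maxc : Int) : Nat → Int
  | 0 => maxc
  | fuel+1 =>
    if c < m then
      let count := aRun row m c 0 (m - c).toNat
      let maxc' := if maxc < count then count else maxc
      aScan row m (c + count + 1) maxc' fuel
    else maxc

def get_longest (arr : List (List String)) (n : Int) (m : Int) : Int :=
  (PySem.List.pyRange 0 n 1).foldl
    (fun maxc r => aScan (PySem.List.pyGetD arr r []) m 0 maxc (m.toNat + 1)) 0

-- ===== PORT B =====
-- loop body: 'cur = cur + 1 if cell == '1' else 0; if cur > best: best = cur'
def bRowStep (p : Int × Int) (cell : String) : Int × Int :=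
  let cur := if cell == "1" then p.1 + 1 else 0
  let best := if cur > p.2 then cur else p.2
  (cur, best)

def get_longest_alt (arr : List (List String)) (n : Int) (m : Int) : Int :=
  (PySem.List.slice arr none (some (max 0 n))).foldl
    (fun best row =>
      ((PySem.List.slice row none (some (max 0 m))).foldl bRowStep (0, best)).2) 0

-- ===== PRECONDITION & SPEC =====
-- Pre_ excludes exactly the inputs where A raises IndexError: n,m > 0 with fewer than n rows,
-- or one of the first n rows shorter than m.
def Pre_get_longest (arr : List (List String)) (n : Int) (m : Int) : Prop :=
  0 < n → 0 < m → n ≤ (arr.length : Int) ∧ ∀ row ∈ arr.take n.toNat, m ≤ (row.length : Int)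
instance (arr : List (List String)) (n : Int) (m : Int) : Decidable (Pre_get_longest arr n m) := by
  unfold Pre_get_longest; infer_instance
def pvWitness_get_longest : List (List String) × Int × Int := ([["1", "0"], ["1", "1"]], 2, 2)

def Spec_get_longest (arr : List (List String)) (n : Int) (m : Int) (out : Int) : Prop := out = get_longest_alt arr n m
instance (arr : List (List String)) (n : Int) (m : Int) (out : Int) : Decidable (Spec_get_longest arr n m out) := by unfold Spec_get_longest; infer_instance

-- ===== CLAIM (what is proved, stated in full; the proofs are below) =====
def Claim_equal_get_longest : Prop := ∀ (arr : List (List String)) (n : Int) (m : Int), Dom_get_longest arr n m → Pre_get_longest arr n m → Spec_get_longest arr n m (get_longest arr n m)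
-- ===== LEMMAS AND PROOFS =====

-- proof-side reformulation of A's outer while on the explicit list of remaining cells
def runA (l : List String) (maxc : Int) : Int :=
  if h : l = [] then maxc
  else
    let k := (l.takeWhile (fun s => s == "1")).length
    runA (l.drop (k + 1)) (if maxc < (k : Int) then (k : Int) else maxc)
termination_by l.length
decreasing_by
  have : 0 < l.length := List.length_pos_iff.mpr h
  simp only [List.length_drop]; omega

theorem bfold_best_mono (l : List String) (cur best : Int) :
    best ≤ (List.foldl bRowStep (cur, best) l).2 := by
  induction l generalizing cur best with
  | nil => simp
  | cons x t ih =>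
    simp only [List.foldl_cons]
    refine le_trans ?_ (ih _ _)
    simp only [bRowStep]
    split <;> split <;> omega

theorem bfold_ones (k : Nat) (t : List String) (cur best : Int) (h : cur ≤ best) :
    List.foldl bRowStep (cur, best) (List.replicate k "1" ++ t)
      = List.foldl bRowStep (cur + k, if best < cur + k then cur + k else best) t := by
  induction k generalizing cur best with
  | zero => simp [show ¬ best < cur by omega]
  | succ k ih =>
    rw [List.replicate_succ, List.cons_append, List.foldl_cons]
    have hstep : bRowStep (cur, best) "1" = (cur + 1, if best < cur + 1 then cur + 1 else best) := by
      simp only [bRowStep]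
      split_ifs <;> simp_all <;> omega
    rw [hstep, ih _ _ (by split <;> omega)]
    congr 1
    rw [Prod.mk.injEq]
    refine ⟨by push_cast; ring, ?_⟩
    push_cast
    split_ifs <;> omega

theorem takeWhile_ones (l : List String) :
    l.takeWhile (fun s => s == "1") = List.replicate (l.takeWhile (fun s => s == "1")).length "1" := by
  apply List.eq_replicate_of_mem
  intro b hb
  have := List.mem_takeWhile_imp hb
  simpa using this

theorem runA_eq_bfold (N : Nat) : ∀ (l : List String) (best : Int), l.length ≤ N → 0 ≤ best →
    runA l best = (List.foldl bRowStep (0, best) l).2 := by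
  induction N with
  | zero =>
    intro l best hl _
    have : l = [] := List.length_eq_zero_iff.mp (Nat.le_zero.mp hl)
    subst this; simp [runA]
  | succ N ih =>
    intro l best hl hb
    by_cases hnil : l = []
    · subst hnil; simp [runA]
    · obtain ⟨k, hk⟩ : ∃ k, (l.takeWhile (fun s => s == "1")).length = k := ⟨_, rfl⟩
      have hdecomp : l = List.replicate k "1" ++ l.dropWhile (fun s => s == "1") := by
        nth_rewrite 1 [← List.takeWhile_append_dropWhile (p := fun s => s == "1") (l := l)]
        rw [takeWhile_ones l, hk]
      rw [runA, dif_neg hnil, hk]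
      dsimp only
      cases hrest : l.dropWhile (fun s => s == "1") with
      | nil =>
        have hlk : l = List.replicate k "1" := by rw [hdecomp, hrest, List.append_nil]
        have hlen : l.length = k := by rw [hlk]; simp
        have hdrop : l.drop (k + 1) = [] := List.drop_eq_nil_of_le (by omega)
        rw [hdrop, runA, dif_pos rfl]
        conv_rhs => rw [hlk, ← List.append_nil (List.replicate k "1")]
        rw [bfold_ones k [] 0 best hb]
        simp
      | cons x rest =>
        have h1 : List.dropWhile (fun s : String => s == "1") l ≠ [] := by rw [hrest]; simp
        have hx : (x == "1") = false := by
          have h2 := List.head_dropWhile_not (fun s : String => s == "1") h1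
          rwa [show (List.dropWhile (fun s : String => s == "1") l).head h1 = x from by
            simp [hrest]] at h2
        have hdrop : l.drop (k + 1) = rest := by
          rw [hdecomp, hrest]
          rw [show k + 1 = (List.replicate k ("1" : String)).length + 1 by simp]
          rw [List.drop_append]
          simp
        rw [hdrop]
        conv_rhs => rw [hdecomp, hrest]
        rw [bfold_ones k (x :: rest) 0 best hb]
        simp only [List.foldl_cons, zero_add]
        have hstep : bRowStep ((k : Int), if best < (k:Int) then (k:Int) else best) x
            = (0, if best < (k:Int) then (k:Int) else best) := by
          simp only [bRowStep, hx, Bool.false_eq_true, if_false]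
          rw [Prod.mk.injEq]
          refine ⟨rfl, ?_⟩
          split_ifs <;> omega
        rw [hstep]
        have hlen : rest.length ≤ N := by
          have h3 : l.length = k + 1 + rest.length := by
            rw [hdecomp, hrest]; simp; omega
          omega
        rw [← ih rest _ hlen (by split <;> omega)]

theorem aRun_eq (fuel : Nat) : ∀ (row : List String) (m c count : Int), 0 ≤ c → 0 ≤ count →
    m ≤ (row.length : Int) → (m - c - count).toNat ≤ fuel →
    aRun row m c count fuel
      = count + ((((row.take m.toNat).drop (c + count).toNat).takeWhile (fun s => s == "1")).length : Int) := by
  induction fuel with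
  | zero =>
    intro row m c count hc hcnt hm hf
    have hge : m ≤ c + count := by omega
    have hnil : (row.take m.toNat).drop (c + count).toNat = [] := by
      apply List.drop_eq_nil_of_le
      simp only [List.length_take]
      omega
    rw [hnil]
    simp [aRun]
  | succ fuel ih =>
    intro row m c count hc hcnt hm hf
    rw [aRun]
    by_cases hlt : c + count < m
    · have hidx : (c + count).toNat < row.length := by omega
      have hidxm : (c + count).toNat < m.toNat := by omega
      have htk : ((row.take m.toNat)).length = m.toNat := by
        simp only [List.length_take]; omega
      have hconsd : (row.take m.toNat).drop (c + count).toNat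
          = (row.take m.toNat)[(c + count).toNat]'(by omega) :: (row.take m.toNat).drop ((c + count).toNat + 1) :=
        List.drop_eq_getElem_cons (by omega)
      have helem : (row.take m.toNat)[(c + count).toNat]'(by omega) = row[(c + count).toNat]'hidx := by
        simp [List.getElem_take]
      have hget : PySem.List.pyGet? row (c + count) = some (row[(c + count).toNat]'hidx) :=
        PySem.List.pyGet?_eq_some_getElem row (i := c + count) (by omega) (by push_cast; omega)
      by_cases hone : row[(c + count).toNat]'hidx = "1"
      · rw [if_pos ⟨hlt, by rw [hget, hone]⟩]
        rw [ih row m c (count + 1) hc (by omega) hm (by omega)]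
        rw [hconsd, helem, List.takeWhile_cons, if_pos (by simp [hone])]
        have : (c + (count + 1)).toNat = (c + count).toNat + 1 := by omega
        rw [this]
        simp only [List.length_cons]
        push_cast
        ring
      · rw [if_neg (by rintro ⟨-, hg⟩; rw [hget] at hg; exact hone (by simpa using hg))]
        rw [hconsd, helem, List.takeWhile_cons, if_neg (by simpa using hone)]
        simp
    · rw [if_neg (by rintro ⟨h, -⟩; exact hlt h)]
      have hnil : (row.take m.toNat).drop (c + count).toNat = [] := by
        apply List.drop_eq_nil_of_le
        simp only [List.length_take]
        omega
      rw [hnil]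
      simp

theorem aScan_eq (fuel : Nat) : ∀ (row : List String) (m c maxc : Int), 0 ≤ c →
    m ≤ (row.length : Int) → (m - c).toNat < fuel →
    aScan row m c maxc fuel = runA ((row.take m.toNat).drop c.toNat) maxc := by
  induction fuel with
  | zero => intro row m c maxc _ _ hf; omega
  | succ fuel ih =>
    intro row m c maxc hc hm hf
    rw [aScan]
    by_cases hcm : c < m
    · rw [if_pos hcm]
      have hrun := aRun_eq (m - c).toNat row m c 0 hc le_rfl hm (by omega)
      simp only [add_zero] at hrun
      obtain ⟨k, hk⟩ : ∃ k, (((row.take m.toNat).drop c.toNat).takeWhile (fun s => s == "1")).length = k :=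
        ⟨_, rfl⟩
      rw [hk] at hrun
      rw [hrun]
      have hlen' : ((row.take m.toNat).drop c.toNat).length = m.toNat - c.toNat := by
        simp only [List.length_drop, List.length_take]; omega
      have hkle : k ≤ m.toNat - c.toNat := by
        rw [← hk, ← hlen']
        exact (List.takeWhile_sublist _).length_le
      have hnnil : (row.take m.toNat).drop c.toNat ≠ [] := by
        intro h
        have := congrArg List.length h
        rw [hlen'] at this
        simp at this
        omega
      rw [runA, dif_neg hnnil]
      dsimp only
      rw [hk]
      have hdrop2 : ((row.take m.toNat).drop c.toNat).drop (k + 1)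
          = (row.take m.toNat).drop (c + (0 + (k : Int)) + 1).toNat := by
        rw [List.drop_drop]
        congr 1
        omega
      rw [hdrop2]
      rw [show (0 : Int) + (k : Int) = (k : Int) by ring] at *
      exact (ih row m (c + (k : Int) + 1) _ (by omega) hm (by omega))
    · rw [if_neg hcm]
      have hnil : (row.take m.toNat).drop c.toNat = [] := by
        apply List.drop_eq_nil_of_le
        simp only [List.length_take]
        omega
      rw [hnil, runA, dif_pos rfl]

theorem row_chain (row : List String) (m maxc : Int) (hm : m ≤ (row.length : Int)) (hb : 0 ≤ maxc) :
    aScan row m 0 maxc (m.toNat + 1)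
      = (List.foldl bRowStep (0, maxc) (row.take m.toNat)).2 := by
  rw [aScan_eq (m.toNat + 1) row m 0 maxc le_rfl hm (by omega)]
  simp only [Int.toNat_zero, List.drop_zero]
  exact runA_eq_bfold (row.take m.toNat).length _ maxc le_rfl hb

theorem outer_fold (m : Int) : ∀ (rows : List (List String)) (acc : Int), 0 ≤ acc →
    (∀ row ∈ rows, m ≤ (row.length : Int)) →
    rows.foldl (fun acc row => aScan row m 0 acc (m.toNat + 1)) acc
      = rows.foldl (fun best row => ((row.take m.toNat).foldl bRowStep (0, best)).2) acc := by
  intro rows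
  induction rows with
  | nil => intro acc _ _; rfl
  | cons r t ih =>
    intro acc hacc hrows
    simp only [List.foldl_cons]
    rw [row_chain r m acc (hrows r (by simp)) hacc]
    exact ih _ (le_trans hacc (bfold_best_mono _ _ _)) (fun row hr => hrows row (by simp [hr]))

theorem range_fold_take {α β : Type} (arr : List α) (d : α) (f : β → α → β) :
    ∀ (t : Nat) (init : β), t ≤ arr.length →
    (List.range t).foldl (fun acc k => f acc (arr.getD k d)) init = (arr.take t).foldl f init := by
  intro t
  induction t with
  | zero => intro init _; simp
  | succ t ih =>
    intro init ht
    rw [List.range_succ, List.foldl_append, ih init (by omega)]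
    have : arr.take (t + 1) = arr.take t ++ [arr[t]'(by omega)] := by
      rw [List.take_succ]
      simp [List.getElem?_eq_getElem (show t < arr.length by omega)]
    rw [this, List.foldl_append]
    simp [List.getD_eq_getElem?_getD, List.getElem?_eq_getElem (show t < arr.length by omega)]

-- ===== VERDICT (by name: the statement is the Claim_ definition above) =====
theorem foldl_const {α : Type} (l : List α) (f : Int → α → Int) (h : ∀ a x, f a x = a) :
    ∀ acc : Int, l.foldl f acc = acc := by
  induction l with
  | nil => intro acc; rfl
  | cons x t ih => intro acc; rw [List.foldl_cons, h]; exact ih acc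

theorem get_longest_spec : Claim_equal_get_longest := by
  intro arr n m _ hpre
  unfold Spec_get_longest
  have hmax_n : (max 0 n).toNat = n.toNat := by omega
  have hmax_m : (max 0 m).toNat = m.toNat := by omega
  have hB : get_longest_alt arr n m
      = (arr.take n.toNat).foldl (fun best row => ((row.take m.toNat).foldl bRowStep (0, best)).2) 0 := by
    unfold get_longest_alt
    rw [PySem.List.slice_to arr (le_max_left 0 n), hmax_n]
    congr 1
    funext best row
    rw [PySem.List.slice_to row (le_max_left 0 m), hmax_m]
  by_cases hm : 0 < m
  · by_cases hn : 0 < n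
    · obtain ⟨hlen, hrows⟩ := hpre hn hm
      have hA : get_longest arr n m
          = (arr.take n.toNat).foldl (fun maxc row => aScan row m 0 maxc (m.toNat + 1)) 0 := by
        unfold get_longest
        rw [PySem.List.pyRange_one 0 n]
        rw [List.foldl_map]
        simp only [zero_add, PySem.List.pyGetD_natCast, Int.sub_zero]
        exact range_fold_take arr [] (fun maxc row => aScan row m 0 maxc (m.toNat + 1)) n.toNat 0
          (by omega)
      rw [hA, hB]
      exact outer_fold m (arr.take n.toNat) 0 le_rfl
        (fun row hr => hrows row hr)
    · have hn0 : n.toNat = 0 := by omega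
      unfold get_longest
      rw [PySem.List.pyRange_one_eq_nil (by omega), hB, hn0]
      simp
  · have hm0 : m.toNat = 0 := by omega
    unfold get_longest
    rw [hB]
    rw [foldl_const _ _ (fun a r => by
      rw [hm0]
      show aScan (PySem.List.pyGetD arr r []) m 0 a 1 = a
      rw [aScan, if_neg hm])]
    rw [foldl_const _ _ (fun a row => by rw [hm0]; simp)]
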